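-- pv_equiv track=rewrite | github.com/matthewninja/cap1-tech-assassment | code_check/__init__.py | has_multi_line_comment_single
-- ===== SOURCE A (Python) =====
-- def has_multi_line_comment_single(line):
--   in_string_double = False
--   escaped = False
--   for i in range(len(line)):
--     if in_string_double: # escaped character doesn't count for anything
--       if line[i] == '\\':
--         escaped = True
--         continue
--
--     if not escaped and line[i] == '"':
--       in_string_double = not in_string_double
--
--     escaped = False
--     if line[i] == '\'' and not in_string_double and i + 2 < len(line):
--       if line[i+1] == '\'' and line[i+2] == '\'':
--         return True
--   return False
-- ===== SOURCE B (Python) =====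
-- def has_multi_line_comment_single(line):
--     # 3-state DFA over the line: 0 = code, 1 = inside a double-quoted string,
--     # 2 = just saw a backslash inside the string (next char is escaped).
--     def step(s, ch):
--         if s == 0:
--             return 1 if ch == '"' else 0
--         if s == 1:
--             if ch == '\\':
--                 return 2
--             return 0 if ch == '"' else 1
--         return 2 if ch == '\\' else 1
--     states = []
--     s = 0
--     for ch in line:
--         s = step(s, ch)
--         states.append(s)
--     return any(s == 0 and line[i:i+3] == "'''" for i, s in enumerate(states))
-- ===== Notes on version B (the rewrite author's own statement) =====
-- stated objective: alternative
-- what changed: A fuses string-state tracking and triple-quote detection in one early-returning scan; B separates them: pass 1 runs a 3-state DFA (code / in-double-string / escaped) recording the post-transition state per index, pass 2 checks via any() whether some index classified as code starts a run of three single quotes.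
import Mathlib
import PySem

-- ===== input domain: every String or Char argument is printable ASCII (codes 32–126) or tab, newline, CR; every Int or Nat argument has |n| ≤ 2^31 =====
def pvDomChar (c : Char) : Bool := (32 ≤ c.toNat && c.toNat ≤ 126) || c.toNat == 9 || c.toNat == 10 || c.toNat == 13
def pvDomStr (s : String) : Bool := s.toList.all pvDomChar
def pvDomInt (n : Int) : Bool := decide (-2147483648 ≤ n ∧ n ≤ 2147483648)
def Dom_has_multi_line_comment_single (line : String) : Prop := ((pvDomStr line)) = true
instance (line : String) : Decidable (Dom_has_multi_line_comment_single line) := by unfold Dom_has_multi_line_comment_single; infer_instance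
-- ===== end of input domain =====

-- B replaces A's fused early-returning scan by two passes — a 3-state DFA classifying each
-- position, then a search for a code position starting three single quotes — same cost (objective: alternative).


-- ===== PORT A =====
-- A's loop over i in range(len(line)); the state is (in_string_double, escaped);
-- 'i + 2 < len(line)' is exactly 'the rest after the current char has ≥ 2 elements',
-- and line[i+1], line[i+2] are those two elements.
def pvLoopA : List Char → Bool → Bool → Bool
  | [], _, _ => false
  | c :: rest, in_s, esc =>
    if in_s && c == '\\' then
      pvLoopA rest in_s true            -- escaped = True; continue
    else
      let in_s' := if !esc && c == '"' then !in_s else in_s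
      match rest with
      | c1 :: c2 :: _ =>
        if c == '\'' && !in_s' && c1 == '\'' && c2 == '\'' then true
        else pvLoopA rest in_s' false
      | _ => pvLoopA rest in_s' false

def has_multi_line_comment_single (line : String) : Bool :=
  pvLoopA line.toList false false

-- ===== PORT B =====
-- Source B's DFA: 0 = code, 1 = inside double-quoted string, 2 = backslash escape inside string
def pvDfaStep (s : Nat) (c : Char) : Nat :=
  if s == 0 then (if c == '"' then 1 else 0)
  else if s == 1 then (if c == '\\' then 2 else if c == '"' then 0 else 1)
  else (if c == '\\' then 2 else 1)

-- pass 1: 'states = []; s = 0; for ch in line: s = step(s, ch); states.append(s)'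
def pvStatesB (chars : List Char) : List Nat :=
  (chars.foldl (fun acc c => let s' := pvDfaStep acc.2 c; (acc.1 ++ [s'], s')) (([] : List Nat), 0)).1

-- pass 2: any(s == 0 and line[i:i+3] == "'''" for i, s in enumerate(states))
def has_multi_line_comment_single_alt (line : String) : Bool :=
  let chars := line.toList
  let states := pvStatesB chars
  (PySem.List.enumerate states 0).any (fun p =>
    p.2 == 0 && (PySem.List.slice chars (some p.1) (some (p.1 + 3)) == ['\'', '\'', '\'']))

-- ===== PRECONDITION & SPEC =====
def Spec_has_multi_line_comment_single (line : String) (out : Bool) : Prop := out = has_multi_line_comment_single_alt line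
instance (line : String) (out : Bool) : Decidable (Spec_has_multi_line_comment_single line out) := by unfold Spec_has_multi_line_comment_single; infer_instance

-- ===== CLAIM (what is proved, stated in full; the proofs are below) =====
def Claim_equal_has_multi_line_comment_single : Prop := ∀ (line : String), Dom_has_multi_line_comment_single line → Spec_has_multi_line_comment_single line (has_multi_line_comment_single line)

-- ===== LEMMAS AND PROOFS =====

-- states of the DFA from start state s (what pass 1 computes, structurally)
def pvStatesFrom : Nat → List Char → List Nat
  | _, [] => []
  | s, c :: cs => pvDfaStep s c :: pvStatesFrom (pvDfaStep s c) cs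

theorem pvStatesB_go (cs : List Char) : ∀ (acc : List Nat) (s : Nat),
    (cs.foldl (fun acc c => let s' := pvDfaStep acc.2 c; (acc.1 ++ [s'], s')) (acc, s)).1
      = acc ++ pvStatesFrom s cs := by
  induction cs with
  | nil => intro acc s; simp [pvStatesFrom]
  | cons c cs ih => intro acc s; simp [List.foldl, pvStatesFrom, ih]

theorem pvStatesB_eq (cs : List Char) : pvStatesB cs = pvStatesFrom 0 cs := by
  simpa using pvStatesB_go cs [] 0

theorem pvEnum_shift {α : Type} (l : List α) : ∀ (s : Int),
    PySem.List.enumerate l (s + 1) = (PySem.List.enumerate l s).map (fun p => (p.1 + 1, p.2)) := by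
  induction l with
  | nil => intro s; simp [PySem.List.enumerate_nil]
  | cons x xs ih => intro s; simp [PySem.List.enumerate_cons, ih]

theorem pvAny_congr {α : Type} (l : List α) (f g : α → Bool)
    (h : ∀ x ∈ l, f x = g x) : l.any f = l.any g := by
  induction l with
  | nil => rfl
  | cons x xs ih =>
    simp only [List.any_cons, h x List.mem_cons_self, ih (fun y hy => h y (List.mem_cons.mpr (Or.inr hy)))]

-- shifting enumerate's start by one turns lookups in (c :: cs) into lookups in cs
theorem pvTailShift (c : Char) (cs : List Char) (l : List Nat) :
    (PySem.List.enumerate l (0 + 1)).any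
        (fun p => p.2 == 0 && (PySem.List.slice (c :: cs) (some p.1) (some (p.1 + 3)) == ['\'', '\'', '\''])) =
    (PySem.List.enumerate l 0).any
        (fun p => p.2 == 0 && (PySem.List.slice cs (some p.1) (some (p.1 + 3)) == ['\'', '\'', '\''])) := by
  rw [pvEnum_shift, List.any_map]
  apply pvAny_congr
  intro p hp
  rcases (PySem.List.mem_enumerate_iff _ _ _).mp hp with ⟨k, hk, rfl⟩
  simp only [Function.comp]
  congr 1
  have h1 : ((0 : Int) + k) + 1 = ((k + 1 : Nat) : Int) := by push_cast; ring
  have h2 : (((0 : Int) + k) + 1) + 3 = ((k + 4 : Nat) : Int) := by push_cast; ring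
  have h3 : ((0 : Int) + k) = ((k : Nat) : Int) := by ring
  have h4 : ((0 : Int) + k) + 3 = ((k + 3 : Nat) : Int) := by push_cast; ring
  rw [h2, h1, h4, h3, PySem.List.slice_natCast, PySem.List.slice_natCast]
  simp [List.drop_succ_cons]

-- the main invariant: A's fused loop from state (in_s, esc) equals B's two passes from the
-- corresponding DFA state, on the remaining suffix
theorem pvMain (cs : List Char) : ∀ (in_s esc : Bool), (esc = true → in_s = true) →
    pvLoopA cs in_s esc =
      (PySem.List.enumerate (pvStatesFrom (if esc then 2 else if in_s then 1 else 0) cs) 0).any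
        (fun p => p.2 == 0 && (PySem.List.slice cs (some p.1) (some (p.1 + 3)) == ['\'', '\'', '\''])) := by
  induction cs with
  | nil => intro in_s esc _; simp [pvLoopA, pvStatesFrom, PySem.List.enumerate_nil]
  | cons c cs ih =>
    intro in_s esc hinv
    simp only [pvStatesFrom, PySem.List.enumerate_cons, List.any_cons, pvTailShift]
    by_cases h1 : in_s = true ∧ c = '\\'
    · -- the 'escaped = True; continue' branch of A
      obtain ⟨hin, hc⟩ := h1
      subst hin hc
      have hs' : pvDfaStep (if esc then 2 else if true then 1 else 0) '\\' = 2 := by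
        cases esc <;> simp [pvDfaStep]
      rw [hs']
      have hih := ih true true (fun _ => rfl)
      simp only [pvLoopA]
      rw [if_pos (by simp), hih]
      simp
    · -- the non-continue branch: the toggle happens, the triple quote may be checked
      have hcase : ¬(in_s && c == '\\') = true := by
        simp only [Bool.and_eq_true, beq_iff_eq]
        intro h; exact h1 ⟨h.1, h.2⟩
      have hs' : pvDfaStep (if esc then 2 else if in_s then 1 else 0) c
          = if (if !esc && c == '"' then !in_s else in_s) then 1 else 0 := by
        cases esc with
        | true =>
          have hin : in_s = true := hinv rfl
          subst hin
          have hc : c ≠ '\\' := fun h => h1 ⟨rfl, h⟩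
          simp [pvDfaStep, hc]
        | false =>
          cases in_s with
          | true =>
            have hc : c ≠ '\\' := fun h => h1 ⟨rfl, h⟩
            by_cases hq : c = '"' <;> simp [pvDfaStep, hc, hq]
          | false =>
            by_cases hq : c = '"' <;> simp [pvDfaStep, hq]
      rw [hs']
      have hIH := ih (if !esc && c == '"' then !in_s else in_s) false (by simp)
      simp only [pvLoopA, if_neg hcase]
      rcases cs with _ | ⟨c1, cs1⟩
      · -- rest = []
        simp only [pvStatesFrom, PySem.List.enumerate_nil, List.any_nil] at hIH ⊢
        rw [hIH]
        have hsl : PySem.List.slice [c] none (some (3:Int)) = [c] := by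
          rw [PySem.List.slice_to] <;> simp
        simp [hsl]
      rcases cs1 with _ | ⟨c2, cs2⟩
      · -- rest = [c1]
        rw [hIH]
        have hsl : PySem.List.slice [c, c1] none (some (3:Int)) = [c, c1] := by
          rw [PySem.List.slice_to] <;> simp
        simp [hsl]
      · -- rest = c1 :: c2 :: cs2
        rw [hIH]
        have hsl : PySem.List.slice (c :: c1 :: c2 :: cs2) none (some (3:Int)) = [c, c1, c2] := by
          rw [PySem.List.slice_to] <;> simp [List.take]
        rw [PySem.List.slice_zero_start, (by norm_num : ((0:Int) + 3) = 3), hsl]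
        by_cases hc : c = '\'' <;> by_cases hq1 : c1 = '\'' <;> by_cases hq2 : c2 = '\'' <;>
          cases hb : (if !esc && c == '"' then !in_s else in_s) <;>
            simp_all

theorem has_multi_line_comment_single_spec : Claim_equal_has_multi_line_comment_single := by
  intro line _
  unfold Spec_has_multi_line_comment_single has_multi_line_comment_single has_multi_line_comment_single_alt
  simp only [pvStatesB_eq]
  simpa using pvMain line.toList false false (by simp)
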